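-- pv_equiv track=rewrite | github.com/robertvanhouten81/sql-sap-ai | app/utils/excel_analyzer.py | find_common_headers
-- ===== SOURCE A (Python) =====
-- from typing import Dict, List, Set
--
-- def find_common_headers(headers_dict: Dict[str, Dict[str, List[str]]]) -> Set[str]:
--     """Find common headers across all Excel files."""
--     all_headers = set()
--     common_headers = set()
--     first = True
--
--     for file_headers in headers_dict.values():
--         file_all_headers = set()
--         for sheet_headers in file_headers.values():
--             file_all_headers.update(sheet_headers)
--
--         if first:
--             common_headers = file_all_headers
--             first = False
--         else:
--             common_headers &= file_all_headers
--         all_headers.update(file_all_headers)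
--
--     return common_headers
-- ===== SOURCE B (Python) =====
-- from typing import Dict, List, Set
--
--
-- def find_common_headers(headers_dict: Dict[str, Dict[str, List[str]]]) -> Set[str]:
--     """Find common headers across all Excel files (counting occurrences per file)."""
--     counts: Dict[str, int] = {}
--     for file_headers in headers_dict.values():
--         file_set = dict.fromkeys(h for sheet in file_headers.values() for h in sheet)
--         for h in file_set:
--             counts[h] = counts.get(h, 0) + 1
--     n = len(headers_dict)
--     return {h for h, c in counts.items() if c == n}
-- ===== Notes on version B (the rewrite author's own statement) =====
-- stated objective: alternative
-- what changed: Replaces the running set-intersection accumulator with an occurrence-counting algorithm: one counter dict counts in how many files each header occurs (after per-file dedup), and the result is the headers whose count equals the number of files.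
import Mathlib
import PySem

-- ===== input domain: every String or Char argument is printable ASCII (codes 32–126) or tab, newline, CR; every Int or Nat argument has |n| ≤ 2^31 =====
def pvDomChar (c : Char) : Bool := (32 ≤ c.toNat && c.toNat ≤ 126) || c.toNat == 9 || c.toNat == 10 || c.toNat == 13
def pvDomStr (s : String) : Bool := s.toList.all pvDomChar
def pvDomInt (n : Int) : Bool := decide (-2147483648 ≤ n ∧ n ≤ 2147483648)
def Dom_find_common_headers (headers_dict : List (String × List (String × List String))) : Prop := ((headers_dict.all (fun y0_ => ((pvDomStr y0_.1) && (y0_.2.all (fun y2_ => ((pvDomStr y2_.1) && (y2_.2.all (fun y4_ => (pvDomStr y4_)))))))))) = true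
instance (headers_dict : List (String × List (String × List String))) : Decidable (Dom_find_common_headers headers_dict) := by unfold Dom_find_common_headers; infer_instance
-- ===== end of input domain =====

-- B counts per-file occurrences of each header in one counter dict instead of folding set intersections; objective: alternative (same cost).

-- ===== PORT A =====
-- A's loop carries (all_headers, common_headers, first) and updates them per file.
def find_common_headers (headers_dict : List (String × List (String × List String))) : List String :=
  let st :=
    headers_dict.foldl
      (fun (st : PySem.Set String × PySem.Set String × Bool) file =>
        let file_all_headers :=
          file.2.foldl (fun s sheet => PySem.Set.update s sheet.2) PySem.Set.empty
        let common := if st.2.2 then file_all_headers else PySem.Set.inter st.2.1 file_all_headers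
        (PySem.Set.update st.1 file_all_headers, common, false))
      (PySem.Set.empty, PySem.Set.empty, true)
  st.2.1

-- ===== PORT B =====
-- Source B: a counter dict 'counts[h] = counts.get(h, 0) + 1' over each file's deduped headers
-- (dict.fromkeys = PySem.List.dedup), then the set of headers whose count equals the number of files.
def find_common_headers_alt (headers_dict : List (String × List (String × List String))) : List String :=
  let counts : PySem.Dict String Int :=
    headers_dict.foldl
      (fun counts file =>
        let file_set := PySem.List.dedup (file.2.flatMap (fun sheet => sheet.2))
        file_set.foldl (fun d h => d.insert h (d.getD h 0 + 1)) counts)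
      PySem.Dict.empty
  let n : Int := (headers_dict.length : Int)
  PySem.Set.ofList ((counts.items.filter (fun kv => kv.2 == n)).map (fun kv => kv.1))

-- ===== PRECONDITION & SPEC =====
def Spec_find_common_headers (headers_dict : List (String × List (String × List String))) (out : List String) : Prop := out = find_common_headers_alt headers_dict
instance (headers_dict : List (String × List (String × List String))) (out : List String) : Decidable (Spec_find_common_headers headers_dict out) := by unfold Spec_find_common_headers; infer_instance

-- ===== CLAIM =====
def Claim_equal_find_common_headers : Prop := ∀ (headers_dict : List (String × List (String × List String))), Dom_find_common_headers headers_dict → Spec_find_common_headers headers_dict (find_common_headers headers_dict)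

-- ===== LEMMAS AND PROOFS =====

def pvFileSet (file : String × List (String × List String)) : PySem.Set String :=
  file.2.foldl (fun s sheet => PySem.Set.update s sheet.2) PySem.Set.empty

theorem pvFoldUpdate (l : List (String × List String)) (s : PySem.Set String) :
    l.foldl (fun s sheet => PySem.Set.update s sheet.2) s
    = PySem.Set.update s (l.flatMap (fun sheet => sheet.2)) := by
  induction l generalizing s with
  | nil => rfl
  | cons p t ih => simp [List.flatMap_cons, PySem.Set.update_append, ih]

theorem pvFileSet_eq (file : String × List (String × List String)) :
    PySem.List.dedup (file.2.flatMap (fun sheet => sheet.2)) = pvFileSet file := by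
  unfold pvFileSet; rw [pvFoldUpdate]; rfl

theorem pvFileSet_nodup (file : String × List (String × List String)) :
    (pvFileSet file).Nodup := by
  rw [← pvFileSet_eq]; exact PySem.Set.nodup_ofList _

theorem pvA_loop (l : List (String × List (String × List String)))
    (a c : PySem.Set String) :
    (l.foldl
      (fun (st : PySem.Set String × PySem.Set String × Bool) file =>
        let f := file.2.foldl (fun s sheet => PySem.Set.update s sheet.2) PySem.Set.empty
        let common := if st.2.2 then f else PySem.Set.inter st.2.1 f
        (PySem.Set.update st.1 f, common, false))
      (a, c, false)).2.1
    = (l.map pvFileSet).foldl PySem.Set.inter c := by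
  induction l generalizing a c with
  | nil => rfl
  | cons p t ih => simpa [pvFileSet] using ih _ _

theorem pvFoldl_inter (l : List (PySem.Set String)) (s : PySem.Set String) :
    l.foldl PySem.Set.inter s = s.filter (fun h => l.all (fun u => PySem.Set.contains u h)) := by
  induction l generalizing s with
  | nil => simp
  | cons u t ih =>
    rw [List.foldl_cons, ih]
    show (List.filter _ s).filter _ = _
    rw [List.filter_filter]
    apply List.filter_congr
    intro x _
    simp [Bool.and_comm]

theorem pvCnt_getD (l : List (String × List (String × List String)))
    (d : PySem.Dict String Int) (h : String) :
    (l.foldl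
      (fun counts file =>
        (PySem.List.dedup (file.2.flatMap (fun sheet => sheet.2))).foldl
          (fun d h => d.insert h (d.getD h 0 + 1)) counts)
      d).getD h 0
    = d.getD h 0 + (((l.map (fun f => PySem.List.dedup (f.2.flatMap (fun sheet => sheet.2)))).countP (fun u => PySem.Set.contains u h)) : Int) := by
  induction l generalizing d with
  | nil => simp
  | cons p t ih =>
    rw [List.foldl_cons, ih, PySem.Dict.getD_foldl_insert_add_one]
    have hnd : (PySem.List.dedup (p.2.flatMap (fun sheet => sheet.2))).Nodup :=
      PySem.Set.nodup_ofList _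
    by_cases hm : h ∈ PySem.List.dedup (p.2.flatMap (fun sheet => sheet.2))
    · rw [List.count_eq_one_of_mem hnd hm]
      have hm' : h ∈ PySem.Set.ofList (p.2.flatMap (fun sheet => sheet.2)) := hm
      rw [List.map_cons, List.countP_cons]
      simp only [PySem.List.dedup, PySem.Set.contains_eq_listContains, List.contains_eq_mem,
        hm', decide_true]
      push_cast; ring
    · rw [List.count_eq_zero_of_not_mem hm]
      have hm' : ¬ h ∈ PySem.Set.ofList (p.2.flatMap (fun sheet => sheet.2)) := hm
      rw [List.map_cons, List.countP_cons]
      simp only [PySem.List.dedup, PySem.Set.contains_eq_listContains, List.contains_eq_mem,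
        hm', decide_false]
      push_cast; ring

theorem pvCnt_keys (l : List (String × List (String × List String)))
    (d : PySem.Dict String Int) :
    (l.foldl
      (fun counts file =>
        (PySem.List.dedup (file.2.flatMap (fun sheet => sheet.2))).foldl
          (fun d h => d.insert h (d.getD h 0 + 1)) counts)
      d).keys
    = PySem.Set.update d.keys (l.flatMap (fun f => PySem.List.dedup (f.2.flatMap (fun sheet => sheet.2)))) := by
  induction l generalizing d with
  | nil => simp [PySem.Set.update]
  | cons p t ih =>
    rw [List.foldl_cons, ih, PySem.Dict.keys_foldl_insert, List.flatMap_cons,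
      PySem.Set.update_append]

theorem pvOfList_fileSet (file : String × List (String × List String)) :
    PySem.Set.ofList (file.2.flatMap (fun sheet => sheet.2)) = pvFileSet file :=
  pvFileSet_eq file

theorem find_common_headers_eq (headers_dict : List (String × List (String × List String))) :
    find_common_headers headers_dict = find_common_headers_alt headers_dict := by
  cases headers_dict with
  | nil => rfl
  | cons p t =>
    set counts : PySem.Dict String Int :=
      ((p :: t).foldl
        (fun counts file =>
          (PySem.List.dedup (file.2.flatMap (fun sheet => sheet.2))).foldl
            (fun d h => d.insert h (d.getD h 0 + 1)) counts) PySem.Dict.empty) with hcnt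
    set n : Int := ((p :: t).length : Int) with hn
    -- A's value: fold of intersections = one filter
    have hA : find_common_headers (p :: t)
        = (pvFileSet p).filter (fun h => (t.map pvFileSet).all (fun u => PySem.Set.contains u h)) := by
      have := pvA_loop t (PySem.Set.update PySem.Set.empty (pvFileSet p)) (pvFileSet p)
      rw [pvFoldl_inter] at this
      exact this
    -- the counter's value at h
    have hgetD : ∀ h, counts.getD h 0
        = (((p :: t).map pvFileSet).countP (fun u => PySem.Set.contains u h) : Int) := by
      intro h
      rw [hcnt, pvCnt_getD]
      simp only [PySem.Dict.getD_empty, zero_add, PySem.List.dedup, pvOfList_fileSet]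
    -- the counter's keys, split into file-1 headers and the rest
    have hkeys : counts.keys = pvFileSet p
        ++ List.filter (fun y => !(PySem.Set.contains (pvFileSet p) y))
             (PySem.Set.ofList (t.flatMap pvFileSet)) := by
      rw [hcnt, pvCnt_keys]
      simp only [PySem.Dict.keys_empty]
      rw [show PySem.Set.update ([] : List String)
            ((p :: t).flatMap (fun f => PySem.List.dedup (f.2.flatMap (fun sheet => sheet.2))))
          = PySem.Set.ofList ((p :: t).flatMap
            (fun f => PySem.List.dedup (f.2.flatMap (fun sheet => sheet.2)))) from rfl]
      simp only [List.flatMap_cons, PySem.List.dedup]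
      rw [PySem.Set.ofList_append, PySem.Set.ofList_ofList,
        pvOfList_fileSet, PySem.Set.update_eq_append_filter]
      simp only [pvOfList_fileSet]
    have hkeysnd : counts.keys.Nodup := by
      rw [hcnt, pvCnt_keys]
      exact PySem.Set.nodup_update _ _ (by simp [PySem.Dict.keys_empty])
    -- B's value as a filter of the counter's keys
    have hB : find_common_headers_alt (p :: t)
        = PySem.Set.ofList (counts.keys.filter (fun k => counts.getD k 0 == n)) := by
      have h0 : find_common_headers_alt (p :: t)
          = PySem.Set.ofList ((counts.items.filter (fun kv => kv.2 == n)).map (fun kv => kv.1)) := rfl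
      rw [h0, PySem.Dict.items_eq_map_keys counts hkeysnd 0, List.filter_map, List.map_map]
      congr 1
      rw [show ((fun (kv : String × Int) => kv.2 == n) ∘ fun k => (k, counts.getD k 0))
          = (fun k => counts.getD k 0 == n) from rfl]
      rw [show ((fun (kv : String × Int) => kv.1) ∘ fun k => (k, counts.getD k 0))
          = (fun (k : String) => k) from rfl]
      exact List.map_id' _
    rw [hA, hB, hkeys, List.filter_append]
    -- headers absent from file 1 occur in at most t.length < n files
    have hextras : List.filter (fun k => counts.getD k 0 == n)
        (List.filter (fun y => !(PySem.Set.contains (pvFileSet p) y))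
          (PySem.Set.ofList (t.flatMap pvFileSet))) = [] := by
      rw [List.filter_eq_nil_iff]
      intro y hy
      have hyn : y ∉ pvFileSet p := by
        have := (List.mem_filter.mp hy).2
        simpa using this
      have h0 : PySem.Set.contains (pvFileSet p) y = false := by simpa using hyn
      have hle : counts.getD y 0 ≤ (t.length : Int) := by
        rw [hgetD y, List.map_cons, List.countP_cons, h0]
        have := List.countP_le_length (p := fun u => PySem.Set.contains u y) (l := t.map pvFileSet)
        rw [List.length_map] at this
        rw [if_neg Bool.false_ne_true]
        exact_mod_cast this
      intro hEq
      have hEq' : counts.getD y 0 = n := by simpa using hEq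
      rw [hEq', hn] at hle
      push_cast [List.length_cons] at hle
      omega
    rw [hextras, List.append_nil]
    -- on file 1's headers the two predicates agree
    have hcongr : (pvFileSet p).filter (fun k => counts.getD k 0 == n)
        = (pvFileSet p).filter (fun h => (t.map pvFileSet).all (fun u => PySem.Set.contains u h)) := by
      apply List.filter_congr
      intro h hh
      have hc : PySem.Set.contains (pvFileSet p) h = true := by simpa using hh
      rw [hgetD h, List.map_cons, List.countP_cons, hc]
      rw [Bool.eq_iff_iff]
      simp only [beq_iff_eq, if_true, List.all_eq_true]
      rw [← List.countP_eq_length]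
      rw [hn]
      push_cast [List.length_map, List.length_cons]
      constructor <;> intro hx <;> omega
    rw [hcongr, PySem.Set.ofList_eq_self_of_nodup _ ((pvFileSet_nodup p).filter _)]

-- ===== VERDICT =====
theorem find_common_headers_spec : Claim_equal_find_common_headers := by
  intro headers_dict _
  exact find_common_headers_eq headers_dict
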